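-- pv_equiv track=rewrite | github.com/Deian26/traffic-flow-management-system-test | common/functions.py | GetRoadVehicleCount
-- ===== SOURCE A (Python) =====
-- def GetRoadVehicleCount(laneCounters:dict) -> dict:
--     """
--     Returns the vehicle count for all roads from the given dictionary.
--     This function sums the number of vehicle for each lane on a road and stores that value for the entire road.
--
--     :param laneCounters: a dictionary returned by CityFlow's 'get_lane_vehicle_count' engine function
--     :type laneCounters: dict[str, int]
--
--     :returns: a dictionary containing the number of vehicles on each road (road meaning a segment of road leading to an intersection) (the names of the roads are the keys)
--     :rtype: dict[str, int]
--     """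
--
--     roadVehicleCounters = {}
--
--     for lane in laneCounters.keys():
--         # get the road name by removing lane index suffix
--         road = '_'.join(lane.split('_')[:-1])
--
--         if road in roadVehicleCounters: # this is not the first lane for this road from this dictionary
--             roadVehicleCounters[road] += laneCounters[lane] # add number of vehicles
--         else: # this is the first lane encountered for this road
--             roadVehicleCounters.update({road : laneCounters[lane]}) # store the current number of vehicles (the entry is created now)
--
--     return roadVehicleCounters
-- ===== SOURCE B (Python) =====
-- def GetRoadVehicleCount(laneCounters: dict) -> dict:
--     """Grouped-aggregation rewrite: dedup the road keys, then sum each road's lanes."""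
--     def road(lane):
--         return '_'.join(lane.split('_')[:-1])
--     roads = list(dict.fromkeys(road(lane) for lane in laneCounters))
--     return {r: sum(c for lane, c in laneCounters.items() if road(lane) == r) for r in roads}
-- ===== Notes on version B (the rewrite author's own statement) =====
-- stated objective: alternative
-- what changed: Replaced the single running-accumulator-dict pass with a two-phase grouped aggregation: dedup the road keys in first-appearance order, then build the result by summing each road's matching lanes with an inner scan.
import Mathlib
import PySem

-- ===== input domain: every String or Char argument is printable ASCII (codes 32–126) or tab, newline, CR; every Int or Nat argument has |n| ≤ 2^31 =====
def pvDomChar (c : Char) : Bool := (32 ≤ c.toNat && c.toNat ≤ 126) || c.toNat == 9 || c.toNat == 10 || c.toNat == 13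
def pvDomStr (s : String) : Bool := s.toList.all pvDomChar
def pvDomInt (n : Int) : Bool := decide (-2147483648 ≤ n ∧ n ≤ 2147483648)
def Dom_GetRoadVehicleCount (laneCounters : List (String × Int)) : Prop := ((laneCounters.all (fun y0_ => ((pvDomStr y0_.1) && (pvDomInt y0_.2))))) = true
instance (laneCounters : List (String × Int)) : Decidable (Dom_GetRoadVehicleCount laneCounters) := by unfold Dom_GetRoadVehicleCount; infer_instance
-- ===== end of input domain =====

-- B replaces A's single running-accumulator-dict pass by a two-phase grouped aggregation
-- (dedup road keys in first-appearance order, then an inner-scan sum per road); same return value.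

-- ===== PORT A =====
-- '_'.join(lane.split('_')[:-1])  (used by both Pythons at the same spot)
def pvRoad (lane : String) : String :=
  PySem.Str.join "_" (((PySem.Str.split? lane "_").getD []).dropLast)

def GetRoadVehicleCount (laneCounters : List (String × Int)) : List (String × Int) :=
  let d := PySem.Dict.ofList laneCounters   -- the Python parameter is a dict
  (d.keys.foldl (fun acc lane =>
      let road := pvRoad lane
      if acc.contains road then
        acc.insert road (acc.getD road 0 + d.getD lane 0)  -- laneCounters[lane]: key present, getD exact
      else
        acc.insert road (d.getD lane 0)) PySem.Dict.empty).items

-- ===== PORT B =====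
def GetRoadVehicleCount_alt (laneCounters : List (String × Int)) : List (String × Int) :=
  let items := (PySem.Dict.ofList laneCounters).items
  let roads := PySem.List.dedup (items.map (fun p => pvRoad p.1))
  roads.map (fun r => (r, ((items.filter (fun p => pvRoad p.1 == r)).map Prod.snd).sum))

-- ===== PRECONDITION & SPEC =====
def Spec_GetRoadVehicleCount (laneCounters : List (String × Int)) (out : List (String × Int)) : Prop := out = GetRoadVehicleCount_alt laneCounters
instance (laneCounters : List (String × Int)) (out : List (String × Int)) : Decidable (Spec_GetRoadVehicleCount laneCounters out) := by unfold Spec_GetRoadVehicleCount; infer_instance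

-- ===== CLAIM (what is proved, stated in full; the proofs are below) =====
def Claim_equal_GetRoadVehicleCount : Prop := ∀ (laneCounters : List (String × Int)), Dom_GetRoadVehicleCount laneCounters → Spec_GetRoadVehicleCount laneCounters (GetRoadVehicleCount laneCounters)

-- ===== LEMMAS AND PROOFS =====

-- the combined step of A's loop (the two branches are one insert)
def pvStep (acc : PySem.Dict String Int) (p : String × Int) : PySem.Dict String Int :=
  acc.insert (pvRoad p.1) (acc.getD (pvRoad p.1) 0 + p.2)

-- the per-road sum over a pair list
def pvSum (l : List (String × Int)) (r : String) : Int :=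
  ((l.filter (fun p => pvRoad p.1 == r)).map Prod.snd).sum


theorem pvMain (l : List (String × Int)) :
    (l.foldl pvStep PySem.Dict.empty).items
      = (PySem.List.dedup (l.map (fun p => pvRoad p.1))).map (fun r => (r, pvSum l r)) := by
  induction l using List.reverseRecOn with
  | nil => rfl
  | append_singleton l p ih =>
    have hkeys : (l.foldl pvStep PySem.Dict.empty).keys
        = PySem.List.dedup (l.map (fun p => pvRoad p.1)) := by
      show (l.foldl pvStep PySem.Dict.empty).items.map Prod.fst = _
      rw [ih, List.map_map]
      simp [Function.comp_def]
    have hnd : (l.foldl pvStep PySem.Dict.empty).keys.Nodup := by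
      rw [hkeys]; simp [PySem.List.dedup_eq_ofList, PySem.Set.nodup_ofList]
    have hsum : ∀ r', pvSum (l ++ [p]) r'
        = pvSum l r' + (if pvRoad p.1 == r' then p.2 else 0) := by
      intro r'
      unfold pvSum
      rw [List.filter_append]
      by_cases h : pvRoad p.1 == r' <;> simp [h]
    rw [List.foldl_append]
    simp only [List.foldl_cons, List.foldl_nil]
    by_cases hmem : pvRoad p.1 ∈ l.map (fun p => pvRoad p.1)
    · -- the road is already a key
      have hc : (l.foldl pvStep PySem.Dict.empty).contains (pvRoad p.1) = true := by
        rw [PySem.Dict.contains_iff_mem_keys, hkeys]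
        simpa [PySem.List.mem_dedup] using hmem
      have hgd : (l.foldl pvStep PySem.Dict.empty).getD (pvRoad p.1) 0 = pvSum l (pvRoad p.1) := by
        apply PySem.Dict.getD_of_mem_items _ (v := pvSum l (pvRoad p.1)) ?_ hnd
        rw [ih]
        exact List.mem_map_of_mem (by simpa [PySem.List.mem_dedup] using hmem)
      have hD : PySem.List.dedup ((l ++ [p]).map (fun p => pvRoad p.1))
          = PySem.List.dedup (l.map (fun p => pvRoad p.1)) := by
        simp only [List.map_append, List.map_cons, List.map_nil,
          PySem.List.dedup_eq_ofList, PySem.Set.ofList_append_singleton]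
        exact PySem.Set.add_of_mem (by simpa [PySem.Set.mem_ofList] using hmem)
      rw [pvStep, PySem.Dict.items_insert_of_contains _ _ hc, ih, hD, List.map_map]
      apply List.map_congr_left
      intro r' hr'
      simp only [Function.comp]
      rw [hsum r']
      by_cases h : r' = pvRoad p.1
      · subst h; simp [hgd, add_comm]
      · have : (r' == pvRoad p.1) = false := by simp [h]
        simp [this, beq_iff_eq, Ne.symm h]
    · -- a fresh road key
      have hc : (l.foldl pvStep PySem.Dict.empty).contains (pvRoad p.1) = false := by
        rw [PySem.Dict.contains_eq_decide_mem_keys, hkeys]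
        simpa [PySem.List.mem_dedup] using hmem
      have hgd : (l.foldl pvStep PySem.Dict.empty).getD (pvRoad p.1) 0 = 0 :=
        PySem.Dict.getD_of_not_contains _ _ hc
      have hD : PySem.List.dedup ((l ++ [p]).map (fun p => pvRoad p.1))
          = PySem.List.dedup (l.map (fun p => pvRoad p.1)) ++ [pvRoad p.1] := by
        simp only [List.map_append, List.map_cons, List.map_nil,
          PySem.List.dedup_eq_ofList, PySem.Set.ofList_append_singleton]
        exact PySem.Set.add_of_not_mem (by simpa [PySem.Set.mem_ofList] using hmem)
      have hzero : pvSum l (pvRoad p.1) = 0 := by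
        unfold pvSum
        have : l.filter (fun q => pvRoad q.1 == pvRoad p.1) = [] := by
          apply List.filter_eq_nil_iff.mpr
          intro q hq
          simp only [beq_iff_eq]
          intro hkey
          exact hmem (by simpa [hkey] using List.mem_map_of_mem (f := fun p => pvRoad p.1) hq)
        simp [this]
      rw [pvStep, PySem.Dict.items_insert_of_not_contains _ _ hc, ih, hD, List.map_append]
      congr 1
      · apply List.map_congr_left
        intro r' hr'
        have hne : pvRoad p.1 ≠ r' := by
          intro h
          exact hmem (by simpa [h, PySem.List.mem_dedup] using hr')
        rw [hsum r']
        simp [hne]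
      · simp [hsum, hgd, hzero]

theorem stepEq (d : PySem.Dict String Int) :
    (fun (acc : PySem.Dict String Int) (lane : String) =>
      let road := pvRoad lane
      if acc.contains road then
        acc.insert road (acc.getD road 0 + d.getD lane 0)
      else
        acc.insert road (d.getD lane 0))
    = fun acc lane => pvStep acc (lane, d.getD lane 0) := by
  funext acc lane
  simp only [pvStep]
  by_cases h : acc.contains (pvRoad lane)
  · simp [h]
  · have h' : acc.contains (pvRoad lane) = false := by simpa using h
    simp [h', PySem.Dict.getD_of_not_contains _ _ h']

theorem GetRoadVehicleCount_spec : Claim_equal_GetRoadVehicleCount := by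
  intro laneCounters _
  show GetRoadVehicleCount laneCounters = GetRoadVehicleCount_alt laneCounters
  unfold GetRoadVehicleCount GetRoadVehicleCount_alt
  simp only []
  rw [stepEq]
  have hitems : (PySem.Dict.ofList laneCounters).items
      = (PySem.Dict.ofList laneCounters).keys.map
          (fun k => (k, (PySem.Dict.ofList laneCounters).getD k 0)) :=
    PySem.Dict.items_eq_map_keys _ (PySem.Dict.nodup_keys_ofList _) 0
  have := pvMain ((PySem.Dict.ofList laneCounters).keys.map
      (fun k => (k, (PySem.Dict.ofList laneCounters).getD k 0)))
  rw [List.foldl_map] at this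
  rw [this, ← hitems]
  rfl
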